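-- pv_equiv track=rewrite | github.com/SEMAFORInformatik/femagtools | femagtools/asm.py | _read_sections
-- ===== SOURCE A (Python) =====
-- def _read_sections(f):
--     """return list of ASM sections
--
--     sections are either surrounded by lines starting with '[***'
--     or by starting with any 'Input data' or 'Simulation Results'
--     Args:
--       param f (file) BCH file to be read
--
--     Returns:
--       list of sections
--     """
--
--     section = []
--     for line in f:
--         if ('[****' in line or
--             'Input data' in line or
--                 'Simulation Results' in line):
--             if section:
--                 # skip empty lines
--                 i = 0
--                 try:
--                     while not section[i]:
--                         i = i+1
--                 except IndexError:
--                     i = i-1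
--                 yield section[i:]
--                 section = []
--         else:
--             section.append(line.strip())
--     yield section
-- ===== SOURCE B (Python) =====
-- def _read_sections(f):
--     """Split the lines of f into ASM sections.
--
--     A section boundary is any line containing '[****', 'Input data' or
--     'Simulation Results'.  Phase 1 cuts the stripped lines into chunks at
--     the boundary lines; phase 2 yields every chunk before a boundary with
--     its leading blank lines removed, skipping chunks that are left empty,
--     and finally yields the chunk after the last boundary as is.
--     """
--     sections = [[]]
--     for line in f:
--         if ('[****' in line or 'Input data' in line
--                 or 'Simulation Results' in line):
--             sections.append([])
--         else:
--             sections[-1].append(line.strip())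
--     for sec in sections[:-1]:
--         while sec and not sec[0]:
--             sec.pop(0)
--         if sec:
--             yield sec
--     yield sections[-1]
-- ===== Notes on version B (the rewrite author's own statement) =====
-- stated objective: alternative
-- what changed: Replaces A's emit-while-scanning generator (current-section accumulator with an index while-loop and IndexError recovery for blank skipping) by a two-phase split: first cut the stripped lines into chunks at the boundary lines, then yield each pre-boundary chunk with leading blank lines dropped, skipping chunks left empty, and the trailing chunk as is.
-- intended difference: On inputs where some boundary line is preceded (back to the previous boundary or the start) by a nonempty run of only whitespace-only lines, A yields that section as a single blank string (an artefact of its IndexError recovery i = i-1), while B skips it like every other empty section, which is the intended skip-empty-lines behaviour. — e.g. on _read_sections([" ", "[****"]): A returns [[""], []], B returns [[]]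
import Mathlib
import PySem

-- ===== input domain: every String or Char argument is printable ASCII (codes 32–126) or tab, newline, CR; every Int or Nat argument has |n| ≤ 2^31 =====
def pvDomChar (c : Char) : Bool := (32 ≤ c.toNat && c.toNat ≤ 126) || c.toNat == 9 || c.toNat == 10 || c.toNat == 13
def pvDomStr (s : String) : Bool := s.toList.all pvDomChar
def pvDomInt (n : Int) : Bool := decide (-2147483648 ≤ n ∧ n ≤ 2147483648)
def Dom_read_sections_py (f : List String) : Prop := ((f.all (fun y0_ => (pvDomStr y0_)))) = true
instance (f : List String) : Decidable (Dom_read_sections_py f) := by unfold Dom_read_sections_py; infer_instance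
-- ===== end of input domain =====

-- B restructures A's single emit-while-scanning pass into split-into-chunks-then-trim; same cost,
-- alternative decomposition; on all-blank sections before a boundary B intentionally differs (see D_ below).

-- ===== PORT A =====
-- the delimiter test of the Python 'if' (shared by both ports: both sources contain the same expression)
def asmIsDelim (line : String) : Bool :=
  PySem.Str.isIn "[****" line || PySem.Str.isIn "Input data" line || PySem.Str.isIn "Simulation Results" line

-- A's inner 'i = 0; while not section[i]: i += 1' with 'except IndexError: i = i - 1':
-- walking the list element by element is exactly that index walk
def asmSkip : List String → Int → Int
  | [], i => i - 1
  | x :: rest, i => if x = "" then asmSkip rest (i + 1) else i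

-- A's loop body: state = (sections yielded so far, current section)
def asmStep (st : List (List String) × List String) (line : String) :
    List (List String) × List String :=
  if asmIsDelim line then
    if st.2 = [] then st
    else (st.1 ++ [PySem.List.slice st.2 (some (asmSkip st.2 0)) none], [])
  else (st.1, st.2 ++ [PySem.Str.strip line])

-- generator: the yielded values are collected in order into the first state component
def read_sections_py (f : List String) : List (List String) :=
  let r := f.foldl asmStep ([], [])
  r.1 ++ [r.2]

-- ===== PORT B =====
-- Source B's 'while sec and not sec[0]: sec.pop(0)' — drop the head while it is blank
def asmDropBlank : List String → List String
  | [] => []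
  | x :: rest => if x = "" then asmDropBlank rest else x :: rest

def read_sections_py_alt (f : List String) : List (List String) :=
  -- phase 1: 'sections = [[]]' then append-to-last / start-new-chunk per line
  let sections := f.foldl (fun secs line =>
    if asmIsDelim line then secs ++ [[]]
    else secs.dropLast ++ [(secs.getLastD []) ++ [PySem.Str.strip line]]) [[]]
  -- phase 2: 'for sec in sections[:-1]: trim, yield if nonempty' then 'yield sections[-1]'
  (sections.dropLast.foldl (fun out sec =>
    if asmDropBlank sec = [] then out else out ++ [asmDropBlank sec]) [])
  ++ [sections.getLastD []]

-- ===== PRECONDITION & SPEC =====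
-- On inputs where some boundary line is preceded (back to the previous boundary or the start of the
-- file) by a nonempty run consisting only of whitespace-only lines, A yields that section as a single blank string
-- (an artefact of its IndexError recovery 'i = i-1'), while B skips it like every other empty
-- section, which is the intended 'skip empty lines' behaviour.
-- asmScanD f ne ab: scanning f, 'ne' = the current run of non-boundary lines is nonempty,
-- 'ab' = it consists only of whitespace-only lines so far; true iff such a run ends at a boundary.
def asmScanD : List String → Bool → Bool → Bool
  | [], _, _ => false
  | l :: rest, ne, ab =>
    if asmIsDelim l then (ne && ab) || asmScanD rest false true
    else asmScanD rest true (ab && (PySem.Str.strip l == ""))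

def D_read_sections_py (f : List String) : Prop := asmScanD f false true = true
instance (f : List String) : Decidable (D_read_sections_py f) := by unfold D_read_sections_py; infer_instance

def Spec_read_sections_py (f : List String) (out : List (List String)) : Prop :=
  ¬ D_read_sections_py f → out = read_sections_py_alt f
instance (f : List String) (out : List (List String)) : Decidable (Spec_read_sections_py f out) := by unfold Spec_read_sections_py; infer_instance

def pvDiffWitness_read_sections_py : List String := [" ", "[****"]
def pvDiffWitnessOut_read_sections_py : (List (List String)) × (List (List String)) :=
  ([[""], []], [[]])

-- ===== CLAIM (what is proved, stated in full; the proofs are below) =====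
def Claim_unchanged_read_sections_py : Prop := ∀ (f : List String), Dom_read_sections_py f → Spec_read_sections_py f (read_sections_py f)
def Claim_changed_read_sections_py : Prop := Dom_read_sections_py (pvDiffWitness_read_sections_py) ∧ D_read_sections_py (pvDiffWitness_read_sections_py) ∧ read_sections_py (pvDiffWitness_read_sections_py) = pvDiffWitnessOut_read_sections_py.1 ∧ read_sections_py_alt (pvDiffWitness_read_sections_py) = pvDiffWitnessOut_read_sections_py.2 ∧ pvDiffWitnessOut_read_sections_py.1 ≠ pvDiffWitnessOut_read_sections_py.2
def Claim_exact_read_sections_py : Prop := ∀ (f : List String), Dom_read_sections_py f → D_read_sections_py f → read_sections_py f ≠ read_sections_py_alt f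

-- ===== LEMMAS AND PROOFS =====

-- B's chunk list, in right-recursive form (proof-side mirror of phase 1)
def asmChunks : List String → List (List String)
  | [] => [[]]
  | line :: rest =>
    if asmIsDelim line then [] :: asmChunks rest
    else
      match asmChunks rest with
      | [] => [[PySem.Str.strip line]]
      | c :: cs => (PySem.Str.strip line :: c) :: cs

def asmConsHead (sec : List String) : List (List String) → List (List String)
  | [] => [sec]
  | c :: cs => (sec ++ c) :: cs

-- A's treatment of one non-final chunk
def asmTrim (sec : List String) : List String :=
  if asmDropBlank sec = [] then PySem.List.slice sec (some (-1)) none else asmDropBlank sec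

-- proof-side mirror of A's emission per chunk
def asmEmit : List (List String) → List (List String)
  | [] => []
  | [last] => [last]
  | sec :: c :: cs => (if sec = [] then [] else [asmTrim sec]) ++ asmEmit (c :: cs)

-- proof-side mirror of B's phase 2
def asmEmitB : List (List String) → List (List String)
  | [] => []
  | [last] => [last]
  | sec :: c :: cs => (if asmDropBlank sec = [] then [] else [asmDropBlank sec]) ++ asmEmitB (c :: cs)

theorem asmChunks_ne_nil (f : List String) : asmChunks f ≠ [] := by
  cases f with
  | nil => simp [asmChunks]
  | cons l rest =>
    simp only [asmChunks]
    split
    · simp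
    · split <;> simp

theorem asmSkip_shift (s : List String) (i : Int) : asmSkip s i = i + asmSkip s 0 := by
  induction s generalizing i with
  | nil => simp only [asmSkip]; omega
  | cons x rest ih =>
    by_cases hx : x = ""
    · simp only [asmSkip, if_pos hx]
      rw [ih (i + 1), ih (0 + 1)]; ring
    · simp [asmSkip, hx]

theorem asmSkip_ge (s : List String) : -1 ≤ asmSkip s 0 := by
  induction s with
  | nil => simp [asmSkip]
  | cons x rest ih =>
    by_cases hx : x = ""
    · simp only [asmSkip, if_pos hx]; rw [asmSkip_shift]; omega
    · simp [asmSkip, hx]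

theorem asmSkip_nonneg (s : List String) (hs : s ≠ []) : 0 ≤ asmSkip s 0 := by
  cases s with
  | nil => exact absurd rfl hs
  | cons x rest =>
    by_cases hx : x = ""
    · simp only [asmSkip, if_pos hx]; rw [asmSkip_shift]
      have := asmSkip_ge rest; omega
    · simp [asmSkip, hx]

-- A's skip-then-slice equals dropBlank, or the last line when the chunk is all blank
theorem asmTrim_eq (s : List String) (hs : s ≠ []) :
    PySem.List.slice s (some (asmSkip s 0)) none = asmTrim s := by
  induction s with
  | nil => exact absurd rfl hs
  | cons x rest ih =>
    by_cases hx : x = ""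
    · subst hx
      cases rest with
      | nil => decide
      | cons y r =>
        have hr : (y :: r : List String) ≠ [] := by simp
        have hkey : asmSkip ("" :: y :: r) 0 = 1 + asmSkip (y :: r) 0 := by
          simp only [asmSkip, reduceIte]
          exact asmSkip_shift (y :: r) 1
        have hnn := asmSkip_nonneg (y :: r) hr
        obtain ⟨k, hk⟩ : ∃ k : Nat, asmSkip (y :: r) 0 = (k : Int) :=
          ⟨(asmSkip (y :: r) 0).toNat, (Int.toNat_of_nonneg hnn).symm⟩
        have hslice : PySem.List.slice ("" :: y :: r) (some (asmSkip ("" :: y :: r) 0)) none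
            = PySem.List.slice (y :: r) (some (asmSkip (y :: r) 0)) none := by
          rw [hkey, hk]
          have h1k : (1 : Int) + (k : Int) = ((k + 1 : Nat) : Int) := by push_cast; ring
          rw [h1k, PySem.List.slice_from_natCast, PySem.List.slice_from_natCast]
          simp [List.drop_succ_cons]
        rw [hslice, ih hr]
        have hdb : asmDropBlank ("" :: y :: r) = asmDropBlank (y :: r) := by
          simp [asmDropBlank]
        simp only [asmTrim, hdb]
        split
        · rw [PySem.List.slice_from_neg_one, PySem.List.slice_from_neg_one]
          simp [List.drop_succ_cons, List.length_cons]
        · rfl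
    · have h0 : asmSkip (x :: rest) 0 = 0 := by simp [asmSkip, hx]
      rw [h0]
      have hc0 : ((0 : Int) = ((0 : Nat) : Int)) := rfl
      rw [hc0, PySem.List.slice_from_natCast]
      have hdb : asmDropBlank (x :: rest) = x :: rest := by
        simp [asmDropBlank, hx]
      simp [asmTrim, hdb]

theorem asmEmit_cons (sec : List String) (cs : List (List String)) (h : cs ≠ []) :
    asmEmit (sec :: cs) = (if sec = [] then [] else [asmTrim sec]) ++ asmEmit cs := by
  cases cs with
  | nil => exact absurd rfl h
  | cons c cs' => rfl

theorem asmEmitB_cons (sec : List String) (cs : List (List String)) (h : cs ≠ []) :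
    asmEmitB (sec :: cs) = (if asmDropBlank sec = [] then [] else [asmDropBlank sec]) ++ asmEmitB cs := by
  cases cs with
  | nil => exact absurd rfl h
  | cons c cs' => rfl

-- phase 1 (left fold over the line list) computes the right-recursive chunk list
theorem asmPhase1_eq (f : List String) (secs : List (List String)) (cur : List String) :
    f.foldl (fun secs line =>
      if asmIsDelim line then secs ++ [[]]
      else secs.dropLast ++ [(secs.getLastD []) ++ [PySem.Str.strip line]]) (secs ++ [cur])
    = secs ++ asmConsHead cur (asmChunks f) := by
  induction f generalizing secs cur with
  | nil => simp [asmChunks, asmConsHead]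
  | cons line rest ih =>
    simp only [List.foldl_cons]
    by_cases hd : asmIsDelim line
    · rw [if_pos hd]
      rw [List.append_assoc secs [cur] [[]]]
      rw [show secs ++ ([cur] ++ [[]]) = (secs ++ [cur]) ++ [([] : List String)] by simp]
      rw [ih (secs ++ [cur]) []]
      simp only [asmChunks, if_pos hd]
      cases hch : asmChunks rest with
      | nil => exact absurd hch (asmChunks_ne_nil rest)
      | cons c cs => simp [asmConsHead]
    · rw [if_neg hd]
      have h1 : (secs ++ [cur]).dropLast = secs := by simp
      have h2 : (secs ++ [cur]).getLastD [] = cur := by simp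
      rw [h1, h2, ih secs (cur ++ [PySem.Str.strip line])]
      simp only [asmChunks, if_neg hd]
      cases hch : asmChunks rest with
      | nil => exact absurd hch (asmChunks_ne_nil rest)
      | cons c cs => simp [asmConsHead]

-- phase 2 of B (fold over all but the last chunk, then the last) computes asmEmitB
theorem asmPhase2_eq (cs : List (List String)) (h : cs ≠ []) (out : List (List String)) :
    (cs.dropLast.foldl (fun out sec =>
      if asmDropBlank sec = [] then out else out ++ [asmDropBlank sec]) out)
    ++ [cs.getLastD []]
    = out ++ asmEmitB cs := by
  induction cs generalizing out with
  | nil => exact absurd rfl h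
  | cons c cs' ih =>
    cases cs' with
    | nil => simp [asmEmitB]
    | cons c2 cs'' =>
      have h2 : (c2 :: cs'' : List (List String)) ≠ [] := by simp
      rw [asmEmitB_cons c (c2 :: cs'') h2]
      have hdl : (c :: c2 :: cs'').dropLast = c :: (c2 :: cs'').dropLast := by
        simp [List.dropLast_cons_of_ne_nil]
      have hgl : (c :: c2 :: cs'').getLastD ([] : List String) = (c2 :: cs'').getLastD [] := by
        rfl
      rw [hdl, hgl, List.foldl_cons]
      by_cases hc : asmDropBlank c = []
      · beta_reduce
        rw [if_pos hc, ih h2 out]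
        simp [hc]
      · beta_reduce
        rw [if_neg hc, ih h2 _]
        simp [hc, List.append_assoc]

-- A's single pass, started from any state, produces out ++ asmEmit of the remaining chunks
theorem asmMain (f : List String) (out : List (List String)) (sec : List String) :
    (f.foldl asmStep (out, sec)).1 ++ [(f.foldl asmStep (out, sec)).2]
    = out ++ asmEmit (asmConsHead sec (asmChunks f)) := by
  induction f generalizing out sec with
  | nil => simp [asmChunks, asmConsHead, asmEmit]
  | cons line rest ih =>
    rw [List.foldl_cons]
    by_cases hd : asmIsDelim line
    · by_cases hsec : sec = []
      · subst hsec
        have hstep : asmStep (out, []) line = (out, []) := by simp [asmStep, hd]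
        rw [hstep, ih out []]
        simp only [asmChunks, if_pos hd]
        cases hch : asmChunks rest with
        | nil => exact absurd hch (asmChunks_ne_nil rest)
        | cons c cs =>
          have e1 : asmConsHead ([] : List String) ([] :: c :: cs) = [] :: c :: cs := by
            simp [asmConsHead]
          have e2 : asmConsHead ([] : List String) (c :: cs) = c :: cs := by
            simp [asmConsHead]
          rw [e1, e2, asmEmit_cons [] (c :: cs) (by simp), if_pos rfl]
          simp
      · have hstep : asmStep (out, sec) line
            = (out ++ [PySem.List.slice sec (some (asmSkip sec 0)) none], []) := by
          simp [asmStep, hd, hsec]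
        rw [hstep, ih _ []]
        simp only [asmChunks, if_pos hd]
        cases hch : asmChunks rest with
        | nil => exact absurd hch (asmChunks_ne_nil rest)
        | cons c cs =>
          have e1 : asmConsHead sec ([] :: c :: cs) = sec :: c :: cs := by
            simp [asmConsHead]
          have e2 : asmConsHead ([] : List String) (c :: cs) = c :: cs := by
            simp [asmConsHead]
          rw [e1, e2, asmEmit_cons sec (c :: cs) (by simp), if_neg hsec, asmTrim_eq sec hsec]
          simp [List.append_assoc]
    · have hstep : asmStep (out, sec) line = (out, sec ++ [PySem.Str.strip line]) := by
        simp [asmStep, hd]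
      rw [hstep, ih out _]
      simp only [asmChunks, if_neg hd]
      cases hch : asmChunks rest with
      | nil => exact absurd hch (asmChunks_ne_nil rest)
      | cons c cs => simp [asmConsHead]

-- closed equations for the two ports in terms of the chunk list
theorem portA_eq (f : List String) :
    read_sections_py f = asmEmit (asmChunks f) := by
  have hcs : asmConsHead [] (asmChunks f) = asmChunks f := by
    cases hch : asmChunks f with
    | nil => exact absurd hch (asmChunks_ne_nil f)
    | cons c cs => simp [asmConsHead]
  have := asmMain f [] []
  simpa [read_sections_py, hcs] using this

theorem portB_eq (f : List String) :
    read_sections_py_alt f = asmEmitB (asmChunks f) := by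
  have hcs : asmConsHead [] (asmChunks f) = asmChunks f := by
    cases hch : asmChunks f with
    | nil => exact absurd hch (asmChunks_ne_nil f)
    | cons c cs => simp [asmConsHead]
  have h1 := asmPhase1_eq f [] []
  simp only [List.nil_append] at h1
  have h2 := asmPhase2_eq (asmChunks f) (asmChunks_ne_nil f) []
  simp only [List.nil_append] at h2
  simp only [read_sections_py_alt, h1, hcs, h2]

-- dropBlank is [] exactly on all-blank chunks
theorem asmDropBlank_nil_iff (c : List String) :
    asmDropBlank c = [] ↔ ∀ x ∈ c, x = "" := by
  induction c with
  | nil => simp [asmDropBlank]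
  | cons x rest ih =>
    by_cases hx : x = ""
    · subst hx; simpa [asmDropBlank] using ih
    · simp [asmDropBlank, hx]

-- the scanner's boundary test is asmIsDelim
theorem asmScanD_cons (l : String) (rest : List String) (ne ab : Bool) :
    asmScanD (l :: rest) ne ab
      = if asmIsDelim l then (ne && ab) || asmScanD rest false true
        else asmScanD rest true (ab && (PySem.Str.strip l == "")) := rfl

theorem asmConsHead_append (p : List String) (x : String) (cs : List (List String)) (h : cs ≠ []) :
    asmConsHead p (asmConsHead [x] cs) = asmConsHead (p ++ [x]) cs := by
  cases cs with
  | nil => exact absurd rfl h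
  | cons c cs' => simp [asmConsHead]

theorem asmChunks_nondelim (l : String) (rest : List String) (hd : ¬ asmIsDelim l = true) :
    asmChunks (l :: rest) = asmConsHead [PySem.Str.strip l] (asmChunks rest) := by
  simp only [asmChunks, if_neg hd]
  cases hch : asmChunks rest with
  | nil => exact absurd hch (asmChunks_ne_nil rest)
  | cons c cs => simp [asmConsHead]

-- soundness: if the scanner is false, no non-final chunk is nonempty and all blank
theorem asmScanD_sound (f : List String) (p : List String)
    (h : asmScanD f (decide (p ≠ [])) (p.all (fun s => s == "")) = false) :
    ∀ c ∈ (asmConsHead p (asmChunks f)).dropLast, asmDropBlank c = [] → c = [] := by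
  induction f generalizing p with
  | nil =>
    intro c hc
    simp [asmChunks, asmConsHead] at hc
  | cons l rest ih =>
    by_cases hd : asmIsDelim l
    · rw [asmScanD_cons, if_pos hd, Bool.or_eq_false_iff, Bool.and_eq_false_iff] at h
      obtain ⟨h1, h2⟩ := h
      have hrest := ih [] (by simpa using h2)
      have hchr := asmChunks_ne_nil rest
      have hcs : asmConsHead [] (asmChunks rest) = asmChunks rest := by
        cases hch : asmChunks rest with
        | nil => exact absurd hch hchr
        | cons c cs => simp [asmConsHead]
      rw [hcs] at hrest
      simp only [asmChunks, if_pos hd]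
      have e1 : asmConsHead p ([] :: asmChunks rest) = p :: asmChunks rest := by
        simp [asmConsHead]
      rw [e1]
      intro c hc hdb
      rw [List.dropLast_cons_of_ne_nil hchr] at hc
      rcases List.mem_cons.mp hc with rfl | hc'
      · rcases h1 with hne | hab
        · simpa using hne
        · exfalso
          have : ∀ x ∈ c, x = "" := (asmDropBlank_nil_iff c).mp hdb
          have : c.all (fun s => s == "") = true := by
            rw [List.all_eq_true]; intro x hx; simpa using this x hx
          rw [this] at hab; exact absurd hab (by simp)
      · exact hrest c hc' hdb
    · rw [asmScanD_cons, if_neg hd] at h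
      have harg : (p ++ [PySem.Str.strip l]).all (fun s => s == "")
          = (p.all (fun s => s == "") && (PySem.Str.strip l == "")) := by
        simp [List.all_append]
      have hne : decide ((p ++ [PySem.Str.strip l]) ≠ []) = true := by simp
      have ih' := ih (p ++ [PySem.Str.strip l]) (by rw [hne, harg]; exact h)
      rw [asmChunks_nondelim l rest hd,
        asmConsHead_append p (PySem.Str.strip l) (asmChunks rest) (asmChunks_ne_nil rest)]
      exact ih'

-- when no non-final chunk is nonempty and all blank, A's and B's emissions agree
theorem asmEmit_eq_emitB (cs : List (List String))
    (h : ∀ c ∈ cs.dropLast, asmDropBlank c = [] → c = []) :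
    asmEmit cs = asmEmitB cs := by
  induction cs with
  | nil => rfl
  | cons c cs' ih =>
    cases cs' with
    | nil => rfl
    | cons c2 cs'' =>
      have hne : (c2 :: cs'' : List (List String)) ≠ [] := by simp
      have hhead : asmDropBlank c = [] → c = [] := by
        intro hdb
        exact h c (by rw [List.dropLast_cons_of_ne_nil hne]; exact List.mem_cons_self ..) hdb
      have htail := ih (by
        intro x hx hdb
        refine h x ?_ hdb
        rw [List.dropLast_cons_of_ne_nil hne]
        exact List.mem_cons_of_mem _ hx)
      rw [asmEmit_cons c _ hne, asmEmitB_cons c _ hne, htail]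
      by_cases hc : c = []
      · subst hc; simp [asmDropBlank]
      · by_cases hdb : asmDropBlank c = []
        · exact absurd (hhead hdb) hc
        · simp [hc, hdb, asmTrim]

-- lengths: A emits one extra element for every nonempty all-blank non-final chunk
theorem asmEmit_length (cs : List (List String)) :
    (asmEmit cs).length
      = (asmEmitB cs).length
        + (cs.dropLast.countP (fun c => decide (c ≠ []) && decide (asmDropBlank c = []))) := by
  induction cs with
  | nil => rfl
  | cons c cs' ih =>
    cases cs' with
    | nil => rfl
    | cons c2 cs'' =>
      have hne : (c2 :: cs'' : List (List String)) ≠ [] := by simp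
      rw [asmEmit_cons c _ hne, asmEmitB_cons c _ hne,
        List.dropLast_cons_of_ne_nil hne, List.countP_cons]
      simp only [List.length_append]
      by_cases hc : c = []
      · subst hc; simp [asmDropBlank, ih]
      · by_cases hdb : asmDropBlank c = []
        · simp [hc, hdb, ih]; omega
        · simp [hc, hdb, ih]; omega

theorem asmCountP_pos {α : Type} (p : α → Bool) (l : List α) :
    0 < l.countP p ↔ ∃ a ∈ l, p a = true := by
  rw [Nat.pos_iff_ne_zero, ne_eq, List.countP_eq_zero]
  simp

-- completeness: if the scanner is true, some non-final chunk is nonempty and all blank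
theorem asmScanD_complete (f : List String) (p : List String)
    (h : asmScanD f (decide (p ≠ [])) (p.all (fun s => s == "")) = true) :
    0 < (asmConsHead p (asmChunks f)).dropLast.countP
        (fun c => decide (c ≠ []) && decide (asmDropBlank c = [])) := by
  induction f generalizing p with
  | nil => simp [asmScanD] at h
  | cons l rest ih =>
    by_cases hd : asmIsDelim l
    · rw [asmScanD_cons, if_pos hd, Bool.or_eq_true] at h
      have hchr := asmChunks_ne_nil rest
      simp only [asmChunks, if_pos hd]
      have e1 : asmConsHead p ([] :: asmChunks rest) = p :: asmChunks rest := by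
        simp [asmConsHead]
      have hcs : asmConsHead [] (asmChunks rest) = asmChunks rest := by
        cases hch : asmChunks rest with
        | nil => exact absurd hch hchr
        | cons c cs => simp [asmConsHead]
      rw [e1, List.dropLast_cons_of_ne_nil hchr]
      rcases h with h1 | h2
      · simp only [Bool.and_eq_true, decide_eq_true_iff] at h1
        have hdb : asmDropBlank p = [] := by
          refine (asmDropBlank_nil_iff p).mpr ?_
          intro x hx
          have := List.all_eq_true.mp h1.2 x hx
          simpa using this
        refine (asmCountP_pos _ _).mpr ⟨p, List.mem_cons_self .., ?_⟩
        simp [h1.1, hdb]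
      · have hpos := ih [] (by simpa using h2)
        rw [hcs] at hpos
        obtain ⟨a, ha, hpa⟩ := (asmCountP_pos _ _).mp hpos
        exact (asmCountP_pos _ _).mpr ⟨a, List.mem_cons_of_mem _ ha, hpa⟩
    · rw [asmScanD_cons, if_neg hd] at h
      have harg : (p ++ [PySem.Str.strip l]).all (fun s => s == "")
          = (p.all (fun s => s == "") && (PySem.Str.strip l == "")) := by
        simp [List.all_append]
      have hne : decide ((p ++ [PySem.Str.strip l]) ≠ []) = true := by simp
      have ih' := ih (p ++ [PySem.Str.strip l]) (by rw [hne, harg]; exact h)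
      rw [asmChunks_nondelim l rest hd,
        asmConsHead_append p (PySem.Str.strip l) (asmChunks rest) (asmChunks_ne_nil rest)]
      exact ih'

-- ===== VERDICT (by name: the statements are the Claim_ definitions above) =====
theorem read_sections_py_spec : Claim_unchanged_read_sections_py := by
  intro f _ hnd
  unfold D_read_sections_py at hnd
  rw [Bool.not_eq_true] at hnd
  have hsound := asmScanD_sound f [] (by simpa using hnd)
  have hcs : asmConsHead [] (asmChunks f) = asmChunks f := by
    cases hch : asmChunks f with
    | nil => exact absurd hch (asmChunks_ne_nil f)
    | cons c cs => simp [asmConsHead]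
  rw [hcs] at hsound
  rw [portA_eq, portB_eq, asmEmit_eq_emitB (asmChunks f) hsound]

theorem read_sections_py_changed : Claim_changed_read_sections_py := by
  unfold Claim_changed_read_sections_py; decide

theorem read_sections_py_tight : Claim_exact_read_sections_py := by
  intro f _ hd heq
  unfold D_read_sections_py at hd
  have hcomp := asmScanD_complete f [] (by simpa using hd)
  have hcs : asmConsHead [] (asmChunks f) = asmChunks f := by
    cases hch : asmChunks f with
    | nil => exact absurd hch (asmChunks_ne_nil f)
    | cons c cs => simp [asmConsHead]
  rw [hcs] at hcomp
  have hlen := asmEmit_length (asmChunks f)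
  rw [← portA_eq, ← portB_eq, heq] at hlen
  omega
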